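-- pv_equiv track=rewrite | github.com/Hyusicul/ppp_hw_parkhyeon | hw10_data/ppp_hw10_data.py | sumifs
-- ===== SOURCE A (Python) =====
-- def sumifs(rainfall, months, selected=[6,7,8]):
--     total=0
--     for i in range(len(rainfall)):
--         rain=rainfall[i]
--         month=months[i]
--         if month in selected:
--             total += rain
--     return total
-- ===== SOURCE B (Python) =====
-- def sumifs(rainfall, months, selected=[6,7,8]):
--     # aggregate-first: per-month totals, then pick the distinct selected months
--     table = {}
--     for i in range(len(rainfall)):
--         m = months[i]
--         table[m] = table.get(m, 0) + rainfall[i]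
--     return sum(table.get(m, 0) for m in set(selected))
-- ===== Notes on version B (the rewrite author's own statement) =====
-- stated objective: faster
-- what changed: B replaces A's per-index loop with an 'if month in selected' list scan by building a dict of per-month rainfall totals in one pass and then summing those totals over the distinct selected months, removing the inner membership scan.
import Mathlib
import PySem

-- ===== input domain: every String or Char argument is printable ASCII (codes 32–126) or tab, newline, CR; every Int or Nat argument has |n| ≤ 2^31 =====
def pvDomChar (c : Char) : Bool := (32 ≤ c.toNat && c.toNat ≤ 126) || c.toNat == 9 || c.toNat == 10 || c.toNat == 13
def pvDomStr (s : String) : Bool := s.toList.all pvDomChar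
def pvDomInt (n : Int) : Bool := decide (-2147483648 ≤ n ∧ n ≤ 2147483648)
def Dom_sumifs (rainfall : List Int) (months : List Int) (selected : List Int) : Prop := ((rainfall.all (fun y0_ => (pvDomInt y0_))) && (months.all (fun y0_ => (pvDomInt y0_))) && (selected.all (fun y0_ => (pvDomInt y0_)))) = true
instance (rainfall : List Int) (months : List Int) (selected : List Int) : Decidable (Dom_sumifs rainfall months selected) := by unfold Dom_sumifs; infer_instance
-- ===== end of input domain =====

-- B builds a dict of per-month rainfall totals in one pass, then sums those totals
-- over the distinct selected months (aggregate-then-select), instead of A's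
-- per-index membership-filtered accumulation. Objective: alternative algorithm.


-- ===== PORT A =====
def sumifs (rainfall : List Int) (months : List Int) (selected : List Int) : Int :=
  (PySem.List.pyRange 0 (rainfall.length : Int) 1).foldl
    (fun total i =>
      let rain := (PySem.List.pyGet? rainfall i).getD 0    -- IndexError impossible (i < len rainfall)
      let month := (PySem.List.pyGet? months i).getD 0     -- IndexError excluded by Pre_
      if selected.contains month then total + rain else total) 0

-- ===== PORT B =====
def sumifs_alt (rainfall : List Int) (months : List Int) (selected : List Int) : Int :=
  let table : PySem.Dict Int Int :=
    (PySem.List.pyRange 0 (rainfall.length : Int) 1).foldl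
      (fun d i =>
        let m := (PySem.List.pyGet? months i).getD 0       -- IndexError excluded by Pre_
        d.insert m (d.getD m 0 + (PySem.List.pyGet? rainfall i).getD 0))
      PySem.Dict.empty
  (PySem.Set.ofList selected).foldl (fun acc m => acc + table.getD m 0) 0

-- ===== PRECONDITION & SPEC =====
-- Pre_ excludes exactly the inputs where months is shorter than rainfall: there A
-- raises IndexError at months[i] (and B raises the same way).
def Pre_sumifs (rainfall : List Int) (months : List Int) (selected : List Int) : Prop :=
  rainfall.length ≤ months.length
instance (rainfall : List Int) (months : List Int) (selected : List Int) : Decidable (Pre_sumifs rainfall months selected) := by unfold Pre_sumifs; infer_instance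

def pvWitness_sumifs : List Int × List Int × List Int := ([3, 4, 5], [6, 2, 7], [6, 7, 8])

def Spec_sumifs (rainfall : List Int) (months : List Int) (selected : List Int) (out : Int) : Prop := out = sumifs_alt rainfall months selected
instance (rainfall : List Int) (months : List Int) (selected : List Int) (out : Int) : Decidable (Spec_sumifs rainfall months selected out) := by unfold Spec_sumifs; infer_instance

-- ===== CLAIM (what is proved, stated in full; the proofs are below) =====
def Claim_equal_sumifs : Prop := ∀ (rainfall : List Int) (months : List Int) (selected : List Int), Dom_sumifs rainfall months selected → Pre_sumifs rainfall months selected → Spec_sumifs rainfall months selected (sumifs rainfall months selected)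

-- ===== LEMMAS AND PROOFS =====

-- An index fold over range(len rf) reading rf[k] and ms[k] is a fold over (rf.zip ms).
theorem pv_idx_zip {σ : Type} (g : σ → Int → Int → σ) :
    ∀ (rf ms : List Int) (init : σ), rf.length ≤ ms.length →
      (List.range rf.length).foldl
          (fun acc k => g acc (rf[k]?.getD 0) (ms[k]?.getD 0)) init
        = (rf.zip ms).foldl (fun acc p => g acc p.1 p.2) init := by
  intro rf
  induction rf with
  | nil => intro ms init _; simp
  | cons r rf ih =>
    intro ms init h
    cases ms with
    | nil => simp at h
    | cons m ms =>
      rw [List.length_cons, List.range_succ_eq_map, List.foldl_cons, List.foldl_map,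
        List.zip_cons_cons, List.foldl_cons]
      simp only [List.getElem?_cons_zero, Option.getD_some, List.getElem?_cons_succ]
      exact ih ms (g init r m) (by simpa using h)

-- A's filtered accumulation as init + sum of the filtered rains.
theorem pv_foldl_if_add (sel : List Int) :
    ∀ (L : List (Int × Int)) (init : Int),
      L.foldl (fun t p => if sel.contains p.2 then t + p.1 else t) init
        = init + ((L.filter (fun p => sel.contains p.2)).map (·.1)).sum := by
  intro L
  induction L with
  | nil => intro init; simp
  | cons p L ih =>
    intro init
    rw [List.foldl_cons, ih, List.filter_cons]
    by_cases h : p.2 ∈ sel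
    · simp [h]; ring
    · simp [h]

-- Summing getD over a nodup key list after one insert.
theorem pv_sum_getD_insert (S : List Int) (hS : S.Nodup) (d : PySem.Dict Int Int)
    (m v : Int) :
    (S.map (fun k => (d.insert m v).getD k 0)).sum
      = (S.map (fun k => d.getD k 0)).sum + (if m ∈ S then v - d.getD m 0 else 0) := by
  induction S with
  | nil => simp
  | cons k S ih =>
    have hk : k ∉ S := (List.nodup_cons.mp hS).1
    have hS' := (List.nodup_cons.mp hS).2
    have hrec := ih hS'
    simp only [List.map_cons, List.sum_cons, PySem.Dict.getD_insert] at hrec ⊢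
    by_cases hkm : k = m
    · have hnot : m ∉ S := hkm ▸ hk
      have hmap : (S.map (fun j => if j = m then v else d.getD j 0))
          = S.map (fun j => d.getD j 0) := by
        apply List.map_congr_left
        intro j hj
        have hjne : j ≠ m := fun e => hnot (e ▸ hj)
        simp [hjne]
      rw [hmap, if_pos hkm, if_pos (List.mem_cons.mpr (Or.inl hkm.symm)), hkm]
      ring
    · rw [if_neg hkm, hrec]
      by_cases hmS : m ∈ S
      · rw [if_pos hmS, if_pos (List.mem_cons.mpr (Or.inr hmS))]; ring
      · rw [if_neg hmS, if_neg (by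
          intro hc
          rcases List.mem_cons.mp hc with e | e
          · exact hkm e.symm
          · exact hmS e)]
        ring

-- Per-month totals dict: summing getD over a nodup key set equals the filtered rain sum.
theorem pv_table_sum (S : List Int) (hS : S.Nodup) :
    ∀ (L : List (Int × Int)) (d : PySem.Dict Int Int),
      (S.map (fun k =>
          (L.foldl (fun d p => d.insert p.2 (d.getD p.2 0 + p.1)) d).getD k 0)).sum
        = (S.map (fun k => d.getD k 0)).sum
          + ((L.filter (fun p => decide (p.2 ∈ S))).map (·.1)).sum := by
  intro L
  induction L with
  | nil => intro d; simp
  | cons p L ih =>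
    intro d
    rw [List.foldl_cons, ih, pv_sum_getD_insert S hS d p.2 (d.getD p.2 0 + p.1),
      List.filter_cons]
    by_cases h : p.2 ∈ S
    · simp [h]; ring
    · simp [h]

-- ===== VERDICT (by name: the statement is the Claim_ definition above) =====
theorem sumifs_spec : Claim_equal_sumifs := by
  intro rainfall months selected _ hpre
  unfold Spec_sumifs sumifs sumifs_alt
  have hz := pv_idx_zip (σ := Int)
    (fun total r m => if selected.contains m then total + r else total)
    rainfall months 0 hpre
  have hz' := pv_idx_zip (σ := PySem.Dict Int Int)
    (fun d r m => d.insert m (d.getD m 0 + r))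
    rainfall months PySem.Dict.empty hpre
  simp only [PySem.List.pyRange_zero_nat, List.foldl_map, PySem.List.pyGet?_natCast]
  rw [hz, hz', PySem.List.foldl_add, pv_foldl_if_add,
    pv_table_sum (PySem.Set.ofList selected) (PySem.Set.nodup_ofList selected)
      (rainfall.zip months) PySem.Dict.empty]
  have hfe : (rainfall.zip months).filter (fun p => selected.contains p.2)
      = (rainfall.zip months).filter (fun p => decide (p.2 ∈ PySem.Set.ofList selected)) := by
    apply List.filter_congr
    intro p _
    simp [PySem.Set.mem_ofList]
  rw [hfe]
  simp [PySem.Dict.getD_empty]
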